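-- pv_equiv track=rewrite | github.com/lolpigg/materials | 3 курс 1 семестр/Код будущего/PW#5/functions.py | calculate_age_in_days
-- ===== SOURCE A (Python) =====
-- def calculate_age_in_days(full_age):
--     current_year = 2023
--     birth_year = current_year - full_age
--
--     def is_leap_year(year):
--         return (year % 4 == 0 and year % 100 != 0) or (year % 400 == 0)
--
--     days = 0
--     for year in range(birth_year, current_year + 1):
--         if is_leap_year(year):
--             days += 366
--         else:
--             days += 365
--     return days
-- ===== SOURCE B (Python) =====
-- def calculate_age_in_days(full_age):
--     current_year = 2023
--     birth_year = current_year - full_age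
--
--     def leaps_upto(y):
--         # number of leap years in (-inf-periodic prefix) up to and including y
--         return y // 4 - y // 100 + y // 400
--
--     if birth_year > current_year:
--         return 0
--     n = current_year - birth_year + 1
--     return 365 * n + leaps_upto(current_year) - leaps_upto(birth_year - 1)
-- ===== Notes on version B (the rewrite author's own statement) =====
-- stated objective: faster
-- what changed: Replaced the per-year loop that accumulates each year's day count with a closed-form formula: a constant times the number of years plus a leap-year count obtained from a floor-division prefix sum.
import Mathlib
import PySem

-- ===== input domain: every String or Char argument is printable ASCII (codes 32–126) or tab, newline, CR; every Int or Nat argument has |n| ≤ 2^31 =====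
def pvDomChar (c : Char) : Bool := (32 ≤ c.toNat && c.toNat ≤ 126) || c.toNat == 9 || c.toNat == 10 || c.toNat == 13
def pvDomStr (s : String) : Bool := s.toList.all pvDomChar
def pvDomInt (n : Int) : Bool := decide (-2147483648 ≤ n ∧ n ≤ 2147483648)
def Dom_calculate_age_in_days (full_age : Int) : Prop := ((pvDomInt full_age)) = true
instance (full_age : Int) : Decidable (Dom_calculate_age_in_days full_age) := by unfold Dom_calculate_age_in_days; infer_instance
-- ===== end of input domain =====

-- B replaces A's per-year loop by an O(1) closed form with a floor-division leap-year prefix count (objective: faster).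

-- ===== PORT A =====
def calculate_age_in_days (full_age : Int) : Int :=
  let current_year : Int := 2023
  let birth_year : Int := current_year - full_age
  (PySem.List.pyRange birth_year (current_year + 1) 1).foldl
    (fun days year =>
      if (PySem.Int.mod year 4 == 0 && PySem.Int.mod year 100 != 0) || PySem.Int.mod year 400 == 0
      then days + 366 else days + 365) 0

-- ===== PORT B =====
def pvLeapsUpto (y : Int) : Int :=
  PySem.Int.floordiv y 4 - PySem.Int.floordiv y 100 + PySem.Int.floordiv y 400

def calculate_age_in_days_alt (full_age : Int) : Int :=
  let current_year : Int := 2023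
  let birth_year : Int := current_year - full_age
  if birth_year > current_year then 0
  else
    let n := current_year - birth_year + 1
    365 * n + pvLeapsUpto current_year - pvLeapsUpto (birth_year - 1)

-- ===== PRECONDITION & SPEC =====
def Spec_calculate_age_in_days (full_age : Int) (out : Int) : Prop := out = calculate_age_in_days_alt full_age
instance (full_age : Int) (out : Int) : Decidable (Spec_calculate_age_in_days full_age out) := by unfold Spec_calculate_age_in_days; infer_instance

-- ===== CLAIM (what is proved, stated in full; the proofs are below) =====
def Claim_equal_calculate_age_in_days : Prop := ∀ (full_age : Int), Dom_calculate_age_in_days full_age → Spec_calculate_age_in_days full_age (calculate_age_in_days full_age)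

-- ===== LEMMAS AND PROOFS =====

-- The loop body of A, named for the proofs.
def pvStep (days year : Int) : Int :=
  if (PySem.Int.mod year 4 == 0 && PySem.Int.mod year 100 != 0) || PySem.Int.mod year 400 == 0
  then days + 366 else days + 365

-- One step of the prefix-count equals the leap indicator of the step's year.
theorem pvStep_leaps (d y : Int) :
    pvStep d y = d + 365 + (pvLeapsUpto y - pvLeapsUpto (y - 1)) := by
  unfold pvStep pvLeapsUpto
  simp only [PySem.Int.mod_eq_emod_of_pos (a := y) (show (0:Int) < 4 by norm_num),
    PySem.Int.mod_eq_emod_of_pos (a := y) (show (0:Int) < 100 by norm_num),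
    PySem.Int.mod_eq_emod_of_pos (a := y) (show (0:Int) < 400 by norm_num),
    PySem.Int.floordiv_eq_ediv_of_pos (a := y) (show (0:Int) < 4 by norm_num),
    PySem.Int.floordiv_eq_ediv_of_pos (a := y) (show (0:Int) < 100 by norm_num),
    PySem.Int.floordiv_eq_ediv_of_pos (a := y) (show (0:Int) < 400 by norm_num),
    PySem.Int.floordiv_eq_ediv_of_pos (a := y - 1) (show (0:Int) < 4 by norm_num),
    PySem.Int.floordiv_eq_ediv_of_pos (a := y - 1) (show (0:Int) < 100 by norm_num),
    PySem.Int.floordiv_eq_ediv_of_pos (a := y - 1) (show (0:Int) < 400 by norm_num)]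
  split_ifs with h
  · simp only [Bool.or_eq_true, Bool.and_eq_true, beq_iff_eq, bne_iff_ne, ne_eq] at h
    omega
  · simp only [Bool.or_eq_true, Bool.and_eq_true, beq_iff_eq, bne_iff_ne, ne_eq,
      not_or, not_and_or, not_not] at h
    omega

theorem pvLoop (n : Nat) : ∀ (a d : Int),
    (PySem.List.pyRange a (a + n) 1).foldl pvStep d
      = d + 365 * n + (pvLeapsUpto (a + n - 1) - pvLeapsUpto (a - 1)) := by
  induction n with
  | zero => intro a d; simp [PySem.List.pyRange_one_eq_nil (le_refl a)]
  | succ m ih =>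
      intro a d
      have h : a + ((m + 1 : Nat) : Int) = (a + m) + 1 := by push_cast; ring
      rw [h, PySem.List.pyRange_one_succ_right (by omega), List.foldl_append]
      simp only [List.foldl_cons, List.foldl_nil, ih]
      rw [pvStep_leaps]
      push_cast
      have h1 : a + (m : Int) + 1 - 1 = a + (m : Int) := by ring
      rw [h1]
      ring

theorem calculate_age_in_days_eq_alt (full_age : Int) :
    calculate_age_in_days full_age = calculate_age_in_days_alt full_age := by
  have hA : calculate_age_in_days full_age
      = (PySem.List.pyRange (2023 - full_age) (2023 + 1) 1).foldl pvStep 0 := rfl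
  have hB : calculate_age_in_days_alt full_age
      = if 2023 - full_age > 2023 then 0
        else 365 * (2023 - (2023 - full_age) + 1) + pvLeapsUpto 2023
              - pvLeapsUpto (2023 - full_age - 1) := rfl
  rw [hA, hB]
  by_cases h : 2023 - full_age > (2023 : Int)
  · rw [PySem.List.pyRange_one_eq_nil (by omega), if_pos h]; rfl
  · have hn : (2023 : Int) + 1 = (2023 - full_age) + ((full_age + 1).toNat : Int) := by omega
    rw [hn, pvLoop, if_neg h]
    have ht : ((full_age + 1).toNat : Int) = full_age + 1 := by omega
    rw [ht]
    have h23 : 2023 - full_age + (full_age + 1) - 1 = (2023 : Int) := by ring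
    rw [h23]
    ring

-- ===== VERDICT (by name: the statement is the Claim_ definition above) =====
theorem calculate_age_in_days_spec : Claim_equal_calculate_age_in_days := by
  intro full_age _
  exact calculate_age_in_days_eq_alt full_age
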